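-- pv_equiv track=rewrite | github.com/augustodevjs/algorithms | reorganizarpilha.py | reorganizarpilha
-- ===== SOURCE A (Python) =====
-- def reorganizarpilha(pilha):
--     fila = []
--     pilha_esquerda = []
--     pilha_direita = []
--
--     tamanho = len(pilha)
--
--     if tamanho <= 1:
--         return pilha
--
--     meio = tamanho // 2
--
--     for i in range(tamanho):
--         if i < meio:
--             pilha_esquerda.append(pilha.pop())
--         else:
--             pilha_direita.append(pilha.pop())
--
--     while pilha_esquerda and pilha_direita:
--         fila.append(pilha_direita.pop())
--         fila.append(pilha_esquerda.pop())
--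
--     return fila
-- ===== SOURCE B (Python) =====
-- def reorganizarpilha(pilha):
--     # Return value matches A; A empties pilha for len>1, mirrored here via clear().
--     n = len(pilha)
--     if n <= 1:
--         return pilha
--     meio = n // 2
--     fila = [x for par in zip(pilha[:meio], pilha[n - meio:]) for x in par]
--     pilha.clear()
--     return fila
-- ===== Notes on version B (the rewrite author's own statement) =====
-- stated objective: simpler
-- what changed: Replaces A's pop-based simulation (a splitting loop into two auxiliary stacks followed by a merging while-loop) with direct index interleaving: zip the bottom half pilha[:meio] with the top meio elements pilha[n-meio:] and flatten; the input is cleared afterwards to mirror A's emptying of pilha.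
import Mathlib
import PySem

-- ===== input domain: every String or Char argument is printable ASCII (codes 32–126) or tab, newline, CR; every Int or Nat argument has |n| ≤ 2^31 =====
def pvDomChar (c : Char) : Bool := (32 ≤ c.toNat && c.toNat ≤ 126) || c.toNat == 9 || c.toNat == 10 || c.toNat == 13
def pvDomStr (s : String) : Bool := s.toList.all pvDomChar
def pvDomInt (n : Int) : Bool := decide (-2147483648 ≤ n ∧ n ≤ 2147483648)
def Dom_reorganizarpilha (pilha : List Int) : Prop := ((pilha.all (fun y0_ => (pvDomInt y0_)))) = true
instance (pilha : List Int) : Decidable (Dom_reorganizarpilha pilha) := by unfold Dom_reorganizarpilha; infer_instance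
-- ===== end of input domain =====

-- B replaces A's two pop-based splitting/merging loops by direct index interleaving
-- (simpler, one pass). Equivalence is about the RETURN value; A empties its argument
-- for len > 1 and Source B mirrors that with clear().

-- ===== PORT A =====
-- body of the 'for i in range(tamanho)' loop; state (pilha, pilha_esquerda, pilha_direita)
def pvStepA (meio : Int) (s : List Int × List Int × List Int) (i : Int) :
    List Int × List Int × List Int :=
  if i < meio then
    match PySem.List.pop? s.1 with
    | some (x, p') => (p', s.2.1 ++ [x], s.2.2)
    | none => s   -- Python IndexError; unreachable (loop runs exactly len(pilha) times)
  else
    match PySem.List.pop? s.1 with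
    | some (x, p') => (p', s.2.1, s.2.2 ++ [x])
    | none => s   -- unreachable likewise

-- the 'while pilha_esquerda and pilha_direita' loop
def pvWhileA (fila e d : List Int) : List Int :=
  if e ≠ [] ∧ d ≠ [] then
    match hd : PySem.List.pop? d, _he : PySem.List.pop? e with
    | some (x, d'), some (y, e') => pvWhileA ((fila ++ [x]) ++ [y]) e' d'
    | _, _ => fila   -- unreachable: both lists nonempty
  else fila
termination_by d.length
decreasing_by
  have h := PySem.List.length_of_pop?_eq_some d hd
  simp at h
  omega

def reorganizarpilha (pilha : List Int) : List Int :=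
  let tamanho : Int := PySem.List.len pilha
  if tamanho ≤ 1 then pilha
  else
    let meio : Int := PySem.Int.floordiv tamanho 2
    let st := (PySem.List.pyRange 0 tamanho 1).foldl (pvStepA meio) (pilha, [], [])
    pvWhileA [] st.2.1 st.2.2

-- ===== PORT B =====
def reorganizarpilha_alt (pilha : List Int) : List Int :=
  let n : Int := PySem.List.len pilha
  if n ≤ 1 then pilha
  else
    let meio : Int := PySem.Int.floordiv n 2
    ((PySem.List.slice pilha none (some meio)).zip
        (PySem.List.slice pilha (some (n - meio)) none)).flatMap
      (fun par => [par.1, par.2])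

-- ===== PRECONDITION & SPEC =====
def Spec_reorganizarpilha (pilha : List Int) (out : List Int) : Prop := out = reorganizarpilha_alt pilha
instance (pilha : List Int) (out : List Int) : Decidable (Spec_reorganizarpilha pilha out) := by unfold Spec_reorganizarpilha; infer_instance

-- ===== CLAIM (what is proved, stated in full; the proofs are below) =====
def Claim_equal_reorganizarpilha : Prop := ∀ (pilha : List Int), Dom_reorganizarpilha pilha → Spec_reorganizarpilha pilha (reorganizarpilha pilha)

-- ===== LEMMAS AND PROOFS =====

-- length of a step-1 range (no stock PySem lemma names it)
theorem pv_len_pyRange (a b : Int) : (PySem.List.pyRange a b 1).length = (b - a).toNat := by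
  by_cases h : a < b
  · have : (b - (a + 1)).toNat < (b - a).toNat := by omega
    rw [PySem.List.pyRange_one_cons h, List.length_cons, pv_len_pyRange (a + 1) b]
    omega
  · have hb : b ≤ a := by omega
    rw [PySem.List.pyRange_one_eq_nil hb]
    simp
    omega
termination_by (b - a).toNat

-- zipping only looks at the first l2.length elements of l1
theorem pv_zip_take_length {α β : Type} (l1 : List α) (l2 : List β) :
    (l1.take l2.length).zip l2 = l1.zip l2 := by
  induction l1 generalizing l2 with
  | nil => simp
  | cons a l1 ih =>
    cases l2 with
    | nil => simp
    | cons b l2 => simp [ih]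

-- the for-loop, left phase: every index < meio, pops go to esquerda
theorem pv_phase1 (meio : Int) (idxs : List Int) (r e d : List Int)
    (hlt : ∀ i ∈ idxs, i < meio) (hlen : idxs.length ≤ r.length) :
    List.foldl (pvStepA meio) (r.reverse, e, d) idxs
      = ((r.drop idxs.length).reverse, e ++ r.take idxs.length, d) := by
  induction idxs generalizing r e with
  | nil => simp
  | cons i rest ih =>
    cases r with
    | nil => simp at hlen
    | cons a r' =>
      have hstep : pvStepA meio ((a :: r').reverse, e, d) i
          = (r'.reverse, e ++ [a], d) := by
        simp [pvStepA, hlt i (by simp), PySem.List.pop?_last]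
      rw [List.foldl_cons, hstep,
        ih r' (e ++ [a]) (fun j hj => hlt j (by simp [hj])) (by simpa using hlen)]
      simp

-- the for-loop, right phase: every index ≥ meio, pops go to direita
theorem pv_phase2 (meio : Int) (idxs : List Int) (r e d : List Int)
    (hge : ∀ i ∈ idxs, meio ≤ i) (hlen : idxs.length ≤ r.length) :
    List.foldl (pvStepA meio) (r.reverse, e, d) idxs
      = ((r.drop idxs.length).reverse, e, d ++ r.take idxs.length) := by
  induction idxs generalizing r d with
  | nil => simp
  | cons i rest ih =>
    cases r with
    | nil => simp at hlen
    | cons a r' =>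
      have hstep : pvStepA meio ((a :: r').reverse, e, d) i
          = (r'.reverse, e, d ++ [a]) := by
        have : ¬ i < meio := by have := hge i (by simp); omega
        simp [pvStepA, this, PySem.List.pop?_last]
      rw [List.foldl_cons, hstep,
        ih r' (d ++ [a]) (fun j hj => hge j (by simp [hj])) (by simpa using hlen)]
      simp

-- the while-loop interleaves, stopping at the shorter list
theorem pv_while_eq (E D fila : List Int) :
    pvWhileA fila E.reverse D.reverse
      = fila ++ (D.zip E).flatMap (fun p => [p.1, p.2]) := by
  induction E generalizing D fila with
  | nil => rw [pvWhileA.eq_def]; simp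
  | cons a E' ih =>
    cases D with
    | nil => rw [pvWhileA.eq_def]; simp
    | cons b D' =>
      rw [pvWhileA.eq_def]
      have h1 : (a :: E').reverse ≠ [] := by simp
      have h2 : (b :: D').reverse ≠ [] := by simp
      simp only [h1, h2, ne_eq, not_false_iff, and_self, if_true]
      have hpd : PySem.List.pop? (b :: D').reverse = some (b, D'.reverse) := by
        rw [List.reverse_cons]; exact PySem.List.pop?_last _ _
      have hpe : PySem.List.pop? (a :: E').reverse = some (a, E'.reverse) := by
        rw [List.reverse_cons]; exact PySem.List.pop?_last _ _
      rw [hpd, hpe]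
      show pvWhileA ((fila ++ [b]) ++ [a]) E'.reverse D'.reverse = _
      rw [ih D' ((fila ++ [b]) ++ [a])]
      simp

-- ===== VERDICT (by name: the statement is the Claim_ definition above) =====
theorem reorganizarpilha_spec : Claim_equal_reorganizarpilha := by
  intro pilha _
  unfold Spec_reorganizarpilha reorganizarpilha reorganizarpilha_alt
  simp only [PySem.List.len_eq]
  by_cases hle : (pilha.length : Int) ≤ 1
  · simp [hle]
  · simp only [hle, if_false]
    have hm2 : 2 ≤ pilha.length := by omega
    set m := pilha.length with hm
    set h := m / 2 with hh
    have hhm : h ≤ m - h := by omega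
    have hmeio : PySem.Int.floordiv (↑m) 2 = ((h : Nat) : Int) := by
      rw [show ((2:Int)) = ((2:Nat):Int) from rfl]
      exact PySem.Int.floordiv_natCast m 2
    rw [hmeio]
    -- split the range at meio and run the two phases of the for-loop
    rw [PySem.List.pyRange_one_append 0 (↑h) (↑m) (by positivity) (by exact_mod_cast Nat.div_le_self m 2),
      List.foldl_append]
    have h1 := pv_phase1 ((h : Nat) : Int) (PySem.List.pyRange 0 (↑h) 1) pilha.reverse [] []
      (fun i hi => (PySem.List.mem_pyRange_one.mp hi).2)
      (by rw [pv_len_pyRange]; simp only [List.length_reverse, ← hm]; omega)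
    simp only [List.reverse_reverse, pv_len_pyRange, List.nil_append] at h1
    rw [h1]
    have h2 := pv_phase2 ((h : Nat) : Int) (PySem.List.pyRange (↑h) (↑m) 1)
      (pilha.reverse.drop ((↑h - 0 : Int)).toNat)
      (pilha.reverse.take ((↑h - 0 : Int)).toNat) []
      (fun i hi => (PySem.List.mem_pyRange_one.mp hi).1)
      (by rw [pv_len_pyRange]; simp only [List.length_drop, List.length_reverse, ← hm]; omega)
    simp only [pv_len_pyRange] at h2
    rw [h2]
    -- the for-loop left state ([], take, drop); rewrite both stacks as reverses
    have htoN : ((↑h - 0 : Int)).toNat = h := by omega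
    have htoN2 : ((↑m - ↑h : Int)).toNat = m - h := by omega
    simp only [htoN, htoN2, List.nil_append]
    have hdlen : (pilha.reverse.drop h).length = m - h := by simp only [List.length_drop, List.length_reverse, ← hm]
    have htk : (pilha.reverse.drop h).take (m - h) = pilha.reverse.drop h := by
      rw [← hdlen]; exact List.take_length
    rw [htk]
    have he : pilha.reverse.take h = (pilha.drop (m - h)).reverse := by
      rw [List.take_reverse]
    have hd : pilha.reverse.drop h = (pilha.take (m - h)).reverse := by
      rw [List.drop_reverse]
    rw [he, hd, pv_while_eq]
    -- B's side: slices are take/drop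
    have hslice : (↑m - ↑h : Int) = ((m - h : Nat) : Int) := by omega
    rw [hslice, PySem.List.slice_to_natCast, PySem.List.slice_from_natCast]
    -- the two zips agree: only the first h elements of the left list matter
    have hlen2 : (pilha.drop (m - h)).length = h := by simp only [List.length_drop, ← hm]; omega
    rw [← pv_zip_take_length (pilha.take (m - h)) (pilha.drop (m - h)),
      ← pv_zip_take_length (pilha.take h) (pilha.drop (m - h)), hlen2,
      List.take_take]
    simp [Nat.min_eq_left hhm, List.take_take]
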